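-- pv_equiv track=rewrite | github.com/OpenLAIR/ClawChain | clawchain/audit/verifier.py | _looks_like_secret_access
-- ===== SOURCE A (Python) =====
-- def _looks_like_secret_access(cmd: list[str]) -> bool:
--     joined = " ".join(part.lower() for part in cmd)
--     sensitive_markers = (
--         ".env",
--         "id_rsa",
--         ".ssh",
--         "kubeconfig",
--         "credentials",
--         "secrets",
--         "token",
--         "apikey",
--         "api_key",
--     )
--     return any(marker in joined for marker in sensitive_markers)
-- ===== SOURCE B (Python) =====
-- _SENSITIVE_MARKERS = (
--     ".env",
--     "id_rsa",
--     ".ssh",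
--     "kubeconfig",
--     "credentials",
--     "secrets",
--     "token",
--     "apikey",
--     "api_key",
-- )
--
--
-- def _looks_like_secret_access(cmd: list[str]) -> bool:
--     # No marker contains a space, so a marker occurs in the space-joined
--     # command iff it occurs in some individual argument: test each lowered
--     # part directly, stopping at the first hit, without building the join.
--     for part in cmd:
--         low = part.lower()
--         for marker in _SENSITIVE_MARKERS:
--             if marker in low:
--                 return True
--     return False
-- ===== Notes on version B (the rewrite author's own statement) =====
-- stated objective: alternative
-- what changed: B drops the ' '.join of the whole command and instead scans each lowercased argument separately against the marker table with an early exit, relying on the fact that no marker contains a space (proved: a space-free substring of the join lies inside one part).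
import Mathlib
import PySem

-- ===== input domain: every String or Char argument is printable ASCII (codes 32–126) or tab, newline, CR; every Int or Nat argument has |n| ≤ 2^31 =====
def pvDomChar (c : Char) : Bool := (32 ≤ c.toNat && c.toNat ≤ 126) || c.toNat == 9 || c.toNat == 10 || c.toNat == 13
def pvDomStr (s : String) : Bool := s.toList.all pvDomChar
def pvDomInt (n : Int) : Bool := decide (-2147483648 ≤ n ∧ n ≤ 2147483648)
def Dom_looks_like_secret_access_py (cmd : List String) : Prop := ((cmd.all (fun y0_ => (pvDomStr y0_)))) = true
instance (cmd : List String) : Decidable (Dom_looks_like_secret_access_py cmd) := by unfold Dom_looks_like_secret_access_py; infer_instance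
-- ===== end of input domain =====

-- B replaces the single space-joined scan by a per-argument scan with early exit
-- (a space-free marker cannot cross the join separator); alternative, same cost.


-- ===== PORT A =====
def looks_like_secret_access_py (cmd : List String) : Bool :=
  let joined := PySem.Str.join " " (cmd.map (fun part => PySem.Str.lower part))
  let sensitive_markers : List String :=
    [".env", "id_rsa", ".ssh", "kubeconfig", "credentials", "secrets", "token", "apikey", "api_key"]
  sensitive_markers.any (fun marker => PySem.Str.isIn marker joined)

-- ===== PORT B =====
def pvSensitiveMarkers : List String :=
  [".env", "id_rsa", ".ssh", "kubeconfig", "credentials", "secrets", "token", "apikey", "api_key"]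

def looks_like_secret_access_py_alt (cmd : List String) : Bool :=
  cmd.any (fun part =>
    let low := PySem.Str.lower part
    pvSensitiveMarkers.any (fun marker => PySem.Str.isIn marker low))

-- ===== PRECONDITION & SPEC =====
def Spec_looks_like_secret_access_py (cmd : List String) (out : Bool) : Prop := out = looks_like_secret_access_py_alt cmd
instance (cmd : List String) (out : Bool) : Decidable (Spec_looks_like_secret_access_py cmd out) := by unfold Spec_looks_like_secret_access_py; infer_instance

-- ===== CLAIM (what is proved, stated in full; the proofs are below) =====
def Claim_equal_looks_like_secret_access_py : Prop := ∀ (cmd : List String), Dom_looks_like_secret_access_py cmd → Spec_looks_like_secret_access_py cmd (looks_like_secret_access_py cmd)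

-- ===== LEMMAS AND PROOFS =====

-- a prefix that misses c cannot reach the c in the middle
theorem pv_prefix_of_prefix_append_cons {m a b : List Char} {c : Char}
    (hc : c ∉ m) (h : m <+: a ++ c :: b) : m <+: a := by
  induction m generalizing a with
  | nil => exact List.nil_prefix
  | cons y m' ih =>
    cases a with
    | nil =>
      rcases h with ⟨t, ht⟩
      simp only [List.nil_append, List.cons_append, List.cons.injEq] at ht
      exact absurd (ht.1 ▸ List.mem_cons_self) hc
    | cons z a' =>
      rcases h with ⟨t, ht⟩
      simp only [List.cons_append, List.cons.injEq] at ht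
      rcases ht with ⟨rfl, ht'⟩
      have : m' <+: a' ++ c :: b := ⟨t, ht'⟩
      exact List.cons_prefix_cons.mpr ⟨rfl, ih (fun hmem => hc (List.mem_cons_of_mem _ hmem)) this⟩

-- an infix that misses c lies entirely left or entirely right of the c
theorem pv_infix_append_cons {m a b : List Char} {c : Char} (hc : c ∉ m) :
    m <:+: a ++ c :: b ↔ m <:+: a ∨ m <:+: b := by
  constructor
  · intro h
    induction a with
    | nil =>
      rw [List.nil_append, List.infix_cons_iff] at h
      rcases h with h | h
      · have := pv_prefix_of_prefix_append_cons (a := []) hc (by simpa using h)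
        exact Or.inl this.isInfix
      · exact Or.inr h
    | cons x a' ih =>
      rw [List.cons_append, List.infix_cons_iff] at h
      rcases h with h | h
      · have : m <+: x :: a' := pv_prefix_of_prefix_append_cons (a := x :: a') hc h
        exact Or.inl this.isInfix
      · rcases ih h with h' | h'
        · exact Or.inl (h'.trans (List.suffix_cons x a').isInfix)
        · exact Or.inr h'
  · rintro (h | h)
    · exact h.trans ⟨[], c :: b, by simp⟩
    · exact h.trans ⟨a ++ [c], [], by simp⟩

-- a nonempty space-free infix of the space-join is an infix of one of the parts
theorem pv_infix_intercalate {m : List Char} {c : Char}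
    (hc : c ∉ m) (hm : m ≠ []) (ps : List (List Char)) :
    m <:+: List.intercalate [c] ps ↔ ∃ p ∈ ps, m <:+: p := by
  induction ps with
  | nil =>
    constructor
    · intro h
      rw [show List.intercalate [c] ([] : List (List Char)) = [] from rfl] at h
      exact absurd (List.eq_nil_of_infix_nil h) hm
    · rintro ⟨p, hp, _⟩; simp at hp
  | cons p ps ih =>
    cases ps with
    | nil => simp [List.intercalate]
    | cons q qs =>
      have hstep : List.intercalate [c] (p :: q :: qs) = p ++ c :: List.intercalate [c] (q :: qs) := by
        simp [List.intercalate, List.intersperse]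
      rw [hstep, pv_infix_append_cons hc, ih]
      simp only [List.mem_cons]
      constructor
      · rintro (h | ⟨r, hr, h⟩)
        · exact ⟨p, Or.inl rfl, h⟩
        · exact ⟨r, Or.inr hr, h⟩
      · rintro ⟨r, hr | hr, h⟩
        · exact Or.inl (hr ▸ h)
        · exact Or.inr ⟨r, hr, h⟩

-- one marker against the join = that marker against some lowered part
theorem pv_marker (m : String) (hc : ' ' ∉ m.toList) (hm : m.toList ≠ []) (cmd : List String) :
    PySem.Str.isIn m (PySem.Str.join " " (cmd.map (fun part => PySem.Str.lower part)))
      = cmd.any (fun part => PySem.Str.isIn m (PySem.Str.lower part)) := by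
  rw [Bool.eq_iff_iff, List.any_eq_true]
  rw [PySem.Str.isIn_iff_infix, PySem.Str.toList_join]
  have hsep : (" " : String).toList = [' '] := rfl
  rw [hsep, show PySem.Chars.join [' '] = List.intercalate [' '] from rfl]
  rw [pv_infix_intercalate hc hm]
  simp only [List.map_map, List.mem_map, Function.comp]
  constructor
  · rintro ⟨p, ⟨part, hpart, rfl⟩, h⟩
    exact ⟨part, hpart, (PySem.Str.isIn_iff_infix _ _).mpr h⟩
  · rintro ⟨part, hpart, h⟩
    exact ⟨(PySem.Str.lower part).toList, ⟨part, hpart, rfl⟩, (PySem.Str.isIn_iff_infix _ _).mp h⟩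

theorem pv_any_or {α : Type} (l : List α) (f g : α → Bool) :
    l.any (fun x => f x || g x) = (l.any f || l.any g) := by
  induction l with
  | nil => rfl
  | cons x xs ih => simp [List.any_cons, ih]; ac_rfl

-- ===== VERDICT (by name: the statement is the Claim_ definition above) =====
theorem looks_like_secret_access_py_spec : Claim_equal_looks_like_secret_access_py := by
  intro cmd _
  unfold Spec_looks_like_secret_access_py looks_like_secret_access_py looks_like_secret_access_py_alt pvSensitiveMarkers
  simp only [List.any_cons, List.any_nil]
  rw [pv_marker _ (by decide) (by decide) cmd, pv_marker _ (by decide) (by decide) cmd,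
      pv_marker _ (by decide) (by decide) cmd, pv_marker _ (by decide) (by decide) cmd,
      pv_marker _ (by decide) (by decide) cmd, pv_marker _ (by decide) (by decide) cmd,
      pv_marker _ (by decide) (by decide) cmd, pv_marker _ (by decide) (by decide) cmd,
      pv_marker _ (by decide) (by decide) cmd]
  simp only [Bool.or_false, pv_any_or]
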